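-- pv_equiv track=rewrite | github.com/CristianEstMaida/Programacion_I | listas_parelelas/biblioteca.py | contar_condicion
-- ===== SOURCE A (Python) =====
-- def contar_condicion(lista:list)->list:
--     """
--     La funcion cuenta la cantidad de alumnos de una lista que estan aprobados,
--     promociondos o reprobados.
--     Recibe la lista (list).
--     Retorna la cantidad en una lista.
--     """
--     cantidad_aprobados = 0
--     cantidad_promocionados = 0
--     cantidad_reprobados = 0
--     lista_cantidad_condiciones = []
--     for elemento in lista:
--         if elemento == "Aprobado":
--             cantidad_aprobados += 1
--         elif elemento == "Promocionado":
--             cantidad_promocionados += 1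
--         else:
--             cantidad_reprobados += 1
--     lista_cantidad_condiciones += [cantidad_aprobados]
--     lista_cantidad_condiciones += [cantidad_promocionados]
--     lista_cantidad_condiciones += [cantidad_reprobados]
--     return lista_cantidad_condiciones
-- ===== SOURCE B (Python) =====
-- def contar_condicion(lista: list) -> list:
--     """Count approved/promoted, derive the rest by subtraction (catch-all else)."""
--     aprobados = lista.count("Aprobado")
--     promocionados = lista.count("Promocionado")
--     return [aprobados, promocionados, len(lista) - aprobados - promocionados]
-- ===== Notes on version B (the rewrite author's own statement) =====
-- stated objective: simpler
-- what changed: Replaced the single branching loop with three accumulators by two list.count passes and arithmetic derivation of the remainder (len - aprobados - promocionados), preserving the catch-all else semantics.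
import Mathlib
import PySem

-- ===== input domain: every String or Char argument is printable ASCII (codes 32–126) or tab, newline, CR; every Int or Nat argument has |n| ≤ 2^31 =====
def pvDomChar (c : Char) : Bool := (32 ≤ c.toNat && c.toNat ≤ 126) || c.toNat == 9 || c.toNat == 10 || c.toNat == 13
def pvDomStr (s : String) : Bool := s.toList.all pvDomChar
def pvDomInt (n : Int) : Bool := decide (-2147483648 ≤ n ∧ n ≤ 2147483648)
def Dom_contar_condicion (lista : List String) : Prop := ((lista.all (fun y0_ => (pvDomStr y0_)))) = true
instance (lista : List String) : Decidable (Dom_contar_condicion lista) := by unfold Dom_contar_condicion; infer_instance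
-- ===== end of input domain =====

-- ===== PORT A =====
-- literal port: three accumulators updated by a branching loop, then appended one by one
def contar_condicion (lista : List String) : List Int :=
  let acc := lista.foldl (fun (s : Int × Int × Int) elemento =>
    if elemento == "Aprobado" then (s.1 + 1, s.2.1, s.2.2)
    else if elemento == "Promocionado" then (s.1, s.2.1 + 1, s.2.2)
    else (s.1, s.2.1, s.2.2 + 1)) (0, 0, 0)
  (([] : List Int) ++ [acc.1]) ++ [acc.2.1] ++ [acc.2.2]

-- ===== PORT B =====
-- port of Source B: two count passes, remainder by subtraction
def contar_condicion_alt (lista : List String) : List Int :=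
  let aprobados : Int := PySem.List.count lista "Aprobado"
  let promocionados : Int := PySem.List.count lista "Promocionado"
  [aprobados, promocionados, (lista.length : Int) - aprobados - promocionados]

-- ===== PRECONDITION & SPEC =====
def Spec_contar_condicion (lista : List String) (out : List Int) : Prop := out = contar_condicion_alt lista
instance (lista : List String) (out : List Int) : Decidable (Spec_contar_condicion lista out) := by unfold Spec_contar_condicion; infer_instance

-- ===== CLAIM (what is proved, stated in full; the proofs are below) =====
def Claim_equal_contar_condicion : Prop := ∀ (lista : List String), Dom_contar_condicion lista → Spec_contar_condicion lista (contar_condicion lista)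

-- ===== LEMMAS AND PROOFS =====

-- ===== VERDICT (by name: the statement is the Claim_ definition above) =====
lemma loop_inv (lista : List String) (a p r : Int) :
    lista.foldl (fun (s : Int × Int × Int) elemento =>
      if elemento == "Aprobado" then (s.1 + 1, s.2.1, s.2.2)
      else if elemento == "Promocionado" then (s.1, s.2.1 + 1, s.2.2)
      else (s.1, s.2.1, s.2.2 + 1)) (a, p, r)
    = (a + lista.count "Aprobado", p + lista.count "Promocionado",
       r + ((lista.length : Int) - lista.count "Aprobado" - lista.count "Promocionado")) := by
  induction lista generalizing a p r with
  | nil => simp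
  | cons x xs ih =>
    simp only [List.foldl_cons]
    split_ifs with hA hP <;> rw [ih] <;>
      simp_all [Prod.ext_iff] <;> omega

theorem contar_condicion_spec : Claim_equal_contar_condicion := by
  intro lista _
  unfold Spec_contar_condicion contar_condicion contar_condicion_alt
  rw [loop_inv]
  simp [PySem.List.count]
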